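-- pv_equiv track=rewrite | github.com/nesen2019/everyday | clecode/core/compare.py | equal_element_in_list
-- ===== SOURCE A (Python) =====
-- from typing import List
-- from itertools import combinations
--
-- def equal_element_in_list(lst_true: List, lst_comp: List) -> bool:
--     """
--
--     :param lst_true:
--     :param lst_comp:
--     :return: (bool), True or False
--
--     e.g.
--     l1 = [[1, 2, 3], [1, 3, 2], [2, 1, 3], [2, 3, 1], [3, 1, 2], [3, 2, 1]]
--     l2 = [[1, 2, 3], [1, 3, 2], [2, 1, 3], [2, 3, 1], [3, 1, 2]]
--     l1 = [1, 2, 3]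
--     l2 = [3, 1, 2]
--
--     """
--     if len(lst_true) != len(lst_comp):
--         return False
--
--     for i, j in combinations(range(len(lst_comp)), 2):
--         if lst_comp[i] == lst_comp[j]:
--             return False
--     for i in lst_comp:
--         if i not in lst_true:
--             return False
--
--     return True
-- ===== SOURCE B (Python) =====
-- def equal_element_in_list(lst_true, lst_comp):
--     if len(lst_true) != len(lst_comp):
--         return False
--     seen = []
--     for x in lst_comp:
--         if x in seen or x not in lst_true:
--             return False
--         seen.append(x)
--     return True
-- ===== Notes on version B (the rewrite author's own statement) =====
-- stated objective: faster
-- what changed: Replaced A's quadratic pairwise-combinations duplicate pass plus a separate membership pass by one incremental pass that checks each element against the previously-seen prefix and lst_true, stopping at the first failure.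
import Mathlib
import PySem

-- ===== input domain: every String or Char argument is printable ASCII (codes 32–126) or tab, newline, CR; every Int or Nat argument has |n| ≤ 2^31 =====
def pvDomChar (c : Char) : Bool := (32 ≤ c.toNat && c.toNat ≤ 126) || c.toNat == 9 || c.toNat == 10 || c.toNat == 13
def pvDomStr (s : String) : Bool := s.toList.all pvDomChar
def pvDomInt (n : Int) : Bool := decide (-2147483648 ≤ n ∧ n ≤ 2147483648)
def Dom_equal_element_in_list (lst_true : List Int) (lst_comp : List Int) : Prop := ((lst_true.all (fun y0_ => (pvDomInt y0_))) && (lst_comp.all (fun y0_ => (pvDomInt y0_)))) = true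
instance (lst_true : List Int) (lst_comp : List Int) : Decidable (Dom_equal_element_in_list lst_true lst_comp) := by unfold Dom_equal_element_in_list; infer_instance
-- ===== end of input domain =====

-- B fuses A's separate pairwise-combinations duplicate pass and membership pass into one
-- incremental early-exit pass over lst_comp with a 'seen' prefix list (alternative decomposition).


-- ===== PORT A =====
-- all (i, j) with i < j < n, in the order combinations(range(n), 2) yields them
def pvCombPairs (n : Nat) : List (Nat × Nat) :=
  (List.range n).flatMap (fun i => ((List.range n).filter (fun j => i < j)).map (fun j => (i, j)))

def equal_element_in_list (lst_true : List Int) (lst_comp : List Int) : Bool :=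
  if lst_true.length ≠ lst_comp.length then false
  else if (pvCombPairs lst_comp.length).any
            (fun p => lst_comp.getD p.1 0 == lst_comp.getD p.2 0) then false
  else if lst_comp.any (fun x => !(lst_true.contains x)) then false
  else true

-- ===== PORT B =====
def pvSeenLoop (lst_true : List Int) (seen : List Int) : List Int → Bool
  | [] => true
  | x :: rest =>
      if seen.contains x || !(lst_true.contains x) then false
      else pvSeenLoop lst_true (seen ++ [x]) rest

def equal_element_in_list_alt (lst_true : List Int) (lst_comp : List Int) : Bool :=
  if lst_true.length ≠ lst_comp.length then false
  else pvSeenLoop lst_true [] lst_comp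

-- ===== PRECONDITION & SPEC =====
def Spec_equal_element_in_list (lst_true : List Int) (lst_comp : List Int) (out : Bool) : Prop := out = equal_element_in_list_alt lst_true lst_comp
instance (lst_true : List Int) (lst_comp : List Int) (out : Bool) : Decidable (Spec_equal_element_in_list lst_true lst_comp out) := by unfold Spec_equal_element_in_list; infer_instance

-- ===== CLAIM (what is proved, stated in full; the proofs are below) =====
def Claim_equal_equal_element_in_list : Prop := ∀ (lst_true : List Int) (lst_comp : List Int), Dom_equal_element_in_list lst_true lst_comp → Spec_equal_element_in_list lst_true lst_comp (equal_element_in_list lst_true lst_comp)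

-- ===== LEMMAS AND PROOFS =====

lemma mem_pvCombPairs {n i j : Nat} : (i, j) ∈ pvCombPairs n ↔ i < j ∧ j < n := by
  simp only [pvCombPairs, List.mem_flatMap, List.mem_map, List.mem_filter, List.mem_range,
    decide_eq_true_eq, Prod.mk.injEq]
  constructor
  · rintro ⟨a, ha, b, ⟨hb, hab⟩, h1, h2⟩; subst h1; subst h2; omega
  · rintro ⟨h1, h2⟩; exact ⟨i, by omega, j, ⟨h2, h1⟩, rfl, rfl⟩

-- A's combinations pass returns a hit exactly when lst_comp has a duplicate
lemma combAny_eq_not_nodup (c : List Int) :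
    (pvCombPairs c.length).any (fun p => c.getD p.1 0 == c.getD p.2 0) = !decide c.Nodup := by
  by_cases h : c.Nodup
  · simp only [h, decide_true, Bool.not_true, List.any_eq_false]
    rintro ⟨i, j⟩ hp
    obtain ⟨hij, hjlen⟩ := mem_pvCombPairs.mp hp
    have hi : i < c.length := by omega
    have h' := List.nodup_iff_getElem?_ne_getElem?.mp h i j hij hjlen
    simp only [List.getD_eq_getElem?_getD, List.getElem?_eq_getElem hi,
      List.getElem?_eq_getElem hjlen, Option.getD_some, ne_eq, Option.some.injEq] at h' ⊢
    simpa using h'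
  · simp only [h, decide_false, Bool.not_false, List.any_eq_true]
    rw [List.nodup_iff_getElem?_ne_getElem?] at h
    push Not at h
    obtain ⟨i, j, hij, hjlen, hv⟩ := h
    have hi : i < c.length := by omega
    refine ⟨(i, j), mem_pvCombPairs.mpr ⟨hij, hjlen⟩, ?_⟩
    simp only [List.getElem?_eq_getElem hi, List.getElem?_eq_getElem hjlen,
      Option.some.injEq] at hv
    simp [List.getD_eq_getElem?_getD, List.getElem?_eq_getElem hi,
      List.getElem?_eq_getElem hjlen, hv]

-- invariant of B's single pass: true iff the rest is duplicate-free, inside lst_true,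
-- and disjoint from the already-seen prefix
set_option maxHeartbeats 1000000 in
lemma pvSeenLoop_eq (t : List Int) (c : List Int) : ∀ seen : List Int,
    pvSeenLoop t seen c =
      decide (c.Nodup ∧ (∀ x ∈ c, x ∈ t) ∧ (∀ x ∈ c, x ∉ seen)) := by
  induction c with
  | nil => intro seen; simp [pvSeenLoop]
  | cons x rest ih =>
      intro seen
      rw [pvSeenLoop, ih]
      by_cases hs : x ∈ seen
      · rw [if_pos (by simp [List.contains_eq_mem, hs])]
        symm
        simp only [decide_eq_false_iff_not]
        rintro ⟨-, -, hb⟩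
        exact hb x List.mem_cons_self hs
      · by_cases ht : x ∈ t
        · rw [if_neg (by simp [List.contains_eq_mem, hs, ht])]
          apply decide_eq_decide.mpr
          simp only [List.nodup_cons, List.mem_cons, List.mem_append, List.not_mem_nil]
          constructor
          · rintro ⟨hn, ha, hb⟩
            refine ⟨⟨fun hm => hb x hm (Or.inr (Or.inl rfl)), hn⟩,
              ⟨fun y hy => hy.elim (fun e => e ▸ ht) (ha y), ?_⟩⟩
            intro y hy
            rcases hy with e | hy
            · exact e ▸ hs
            · exact fun hm => hb y hy (Or.inl hm)
          · rintro ⟨⟨hxr, hn⟩, ha, hb⟩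
            refine ⟨hn, fun y hy => ha y (Or.inr hy), fun y hy h2 => ?_⟩
            rcases h2 with h2 | h2 | h2
            · exact hb y (Or.inr hy) h2
            · exact hxr (h2 ▸ hy)
            · exact h2
        · rw [if_pos (by simp [List.contains_eq_mem, ht])]
          symm
          simp only [decide_eq_false_iff_not]
          rintro ⟨-, ha, -⟩
          exact ht (ha x List.mem_cons_self)

-- ===== VERDICT (by name: the statement is the Claim_ definition above) =====
theorem equal_element_in_list_spec : Claim_equal_equal_element_in_list := by
  intro t c _
  unfold Spec_equal_element_in_list equal_element_in_list equal_element_in_list_alt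
  by_cases hl : t.length ≠ c.length
  · simp [hl]
  · simp only [if_neg hl]
    rw [pvSeenLoop_eq, combAny_eq_not_nodup]
    by_cases hn : c.Nodup
    · simp only [hn, decide_true, Bool.not_true, Bool.false_eq_true, if_false]
      by_cases hm : c.any (fun x => !(t.contains x)) = true
      · rw [if_pos hm]
        rw [List.any_eq_true] at hm
        obtain ⟨x, hx, hxt⟩ := hm
        have hxt' : x ∉ t := by simpa [List.contains_eq_mem] using hxt
        symm
        simp only [decide_eq_false_iff_not]
        rintro ⟨-, ha, -⟩
        exact hxt' (ha x hx)
      · rw [if_neg hm]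
        rw [Bool.not_eq_true, List.any_eq_false] at hm
        have hall : ∀ x ∈ c, x ∈ t := by
          intro x hx
          have := hm x hx
          simpa [List.contains_eq_mem] using this
        simp
        exact hall
    · simp [hn]
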